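-- pv_equiv track=rewrite | github.com/DaehanKim/TransformerCVAE | util.py | process_story
-- ===== SOURCE A (Python) =====
-- from collections import deque
--
-- def _add_missing_period(line):
--     END_TOKENS = [".", "!", "?", "...", "'", "`", '"', "\u2019", "\u2019", ")"]
--     if line.startswith("@highlight"):
--         return line
--     if line[-1] in END_TOKENS:
--         return line
--     return line + "."
--
-- def process_story(raw_story):
--     """ Extract the story and summary from a story file.
--
--     Attributes:
--         raw_story (str): content of the story file as an utf-8 encoded string.
--
--     Raises:
--         IndexError: If the stoy is empty or contains no highlights.
--     """
--     nonempty_lines = list(filter(lambda x: len(x) != 0, [line.strip() for line in raw_story.split("\n")]))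
--
--     # for some unknown reason some lines miss a period, add it
--     nonempty_lines = [_add_missing_period(line) for line in nonempty_lines]
--
--     # gather article lines
--     story_lines = []
--     lines = deque(nonempty_lines)
--     while True:
--         try:
--             element = lines.popleft()
--             if element.startswith("@highlight"):
--                 break
--             story_lines.append(element)
--         except IndexError:
--             # if "@highlight" is absent from the file we pop
--             # all elements until there is None, raising an exception.
--             return story_lines, []
--
--     # gather summary lines
--     summary_lines = list(filter(lambda t: not t.startswith("@highlight"), lines))
--
--     return story_lines, summary_lines
-- ===== SOURCE B (Python) =====
-- def _add_missing_period(line):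
--     END_TOKENS = [".", "!", "?", "...", "'", "`", '"', "\u2019", "\u2019", ")"]
--     if line.startswith("@highlight"):
--         return line
--     if line[-1] in END_TOKENS:
--         return line
--     return line + "."
--
-- def process_story(raw_story):
--     lines = [_add_missing_period(l) for l in
--              (s.strip() for s in raw_story.split("\n")) if len(l) != 0]
--     for i, line in enumerate(lines):
--         if line.startswith("@highlight"):
--             return lines[:i], [t for t in lines[i + 1:] if not t.startswith("@highlight")]
--     return lines, []
-- ===== Notes on version B (the rewrite author's own statement) =====
-- stated objective: simpler
-- what changed: Replaces A's exception-driven deque popleft consume loop with a single scan for the index of the first highlight-marker line followed by slicing (prefix = story, filtered suffix = summary).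
import Mathlib
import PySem

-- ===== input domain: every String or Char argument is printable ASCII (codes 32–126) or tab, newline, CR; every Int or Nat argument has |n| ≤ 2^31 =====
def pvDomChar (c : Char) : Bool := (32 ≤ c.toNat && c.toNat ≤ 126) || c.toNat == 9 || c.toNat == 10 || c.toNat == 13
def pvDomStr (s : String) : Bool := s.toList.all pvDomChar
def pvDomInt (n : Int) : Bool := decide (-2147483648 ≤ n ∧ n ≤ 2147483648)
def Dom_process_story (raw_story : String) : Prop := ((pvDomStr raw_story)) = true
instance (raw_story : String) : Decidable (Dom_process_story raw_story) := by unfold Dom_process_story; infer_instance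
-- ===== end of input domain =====

-- B replaces A's exception-driven deque drain with a find-first-'@highlight' scan then slicing (objective: simpler).

-- ===== PORT A =====
-- shared helper _add_missing_period (identical in both Python versions)
def addMissingPeriod (line : String) : String :=
  let END_TOKENS : List String := [".", "!", "?", "...", "'", "`", "\"", "\u2019", "\u2019", ")"]
  if PySem.Str.startswith line "@highlight" then line
  else match PySem.Str.pyGet? line (-1) with
    | some c => if (String.ofList [c]) ∈ END_TOKENS then line else String.ofList (line.toList ++ ['.'])
    | none => line  -- unreachable here: callers pass nonempty lines only

-- shared cleaning pass (identical in both Python versions); split? is none only for sep = "", so getD never fires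
def cleanedLines (raw_story : String) : List String :=
  ((((PySem.Str.split? raw_story "\n").getD []).map PySem.Str.strip).filter
      (fun x => PySem.Str.len x ≠ 0)).map addMissingPeriod

-- A's while-True deque popleft loop (popleft on empty deque = the [] case → return (story_lines, []))
def aLoop : List String → List String → List String × List String
  | [], story_lines => (story_lines, [])
  | element :: lines, story_lines =>
    if PySem.Str.startswith element "@highlight" then
      (story_lines, lines.filter (fun t => !PySem.Str.startswith t "@highlight"))
    else aLoop lines (story_lines ++ [element])

def process_story (raw_story : String) : List String × List String :=
  aLoop (cleanedLines raw_story) []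

-- ===== PORT B =====
def process_story_alt (raw_story : String) : List String × List String :=
  let lines := cleanedLines raw_story
  -- enumerate-scan for the first '@highlight' line; slices lines[:i] / lines[i+1:] (nonneg bounds = take/drop)
  match lines.findIdx? (fun l => PySem.Str.startswith l "@highlight") with
  | some i => (lines.take i, (lines.drop (i + 1)).filter (fun t => !PySem.Str.startswith t "@highlight"))
  | none => (lines, [])

-- ===== PRECONDITION & SPEC =====
def Spec_process_story (raw_story : String) (out : List String × List String) : Prop := out = process_story_alt raw_story
instance (raw_story : String) (out : List String × List String) : Decidable (Spec_process_story raw_story out) := by unfold Spec_process_story; infer_instance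

-- ===== CLAIM (what is proved, stated in full; the proofs are below) =====
def Claim_equal_process_story : Prop := ∀ (raw_story : String), Dom_process_story raw_story → Spec_process_story raw_story (process_story raw_story)

-- ===== LEMMAS AND PROOFS =====
theorem aLoop_eq_find :
    ∀ (lines story : List String),
      aLoop lines story =
        match lines.findIdx? (fun l => PySem.Str.startswith l "@highlight") with
        | some i => (story ++ lines.take i,
            (lines.drop (i + 1)).filter (fun t => !PySem.Str.startswith t "@highlight"))
        | none => (story ++ lines, []) := by
  intro lines
  induction lines with
  | nil => intro story; simp [aLoop]
  | cons e rest ih =>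
    intro story
    rw [List.findIdx?_cons, aLoop]
    by_cases h : PySem.Str.startswith e "@highlight" = true
    · simp only [h, ite_true]
      simp
    · simp only [h, Bool.false_eq_true, ite_false, ih]
      cases hf : List.findIdx? (fun l => PySem.Str.startswith l "@highlight") rest with
      | none => simp
      | some i => simp [List.take_succ_cons]

-- ===== VERDICT (by name: the statement is the Claim_ definition above) =====
theorem process_story_spec : Claim_equal_process_story := by
  intro raw _
  unfold Spec_process_story process_story process_story_alt
  rw [aLoop_eq_find]
  cases hf : List.findIdx? (fun l => PySem.Str.startswith l "@highlight") (cleanedLines raw) <;>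
    simp only [hf] <;> simp
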